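-- pv_equiv track=rewrite | github.com/coolsgupta/leetcode | centernewsPaper.py | centerNewsPaperText
-- ===== SOURCE A (Python) =====
-- def centerNewsPaperText(paragraphs, width):
--     res = ['*'*(width+2)]
--     for x in paragraphs:
--         i = 0
--         while i<len(x):
--             line = x[i]
--             i += 1
--             while i<len(x) and len(line) + len(x[i]) + 1 <= width:
--                 line += ' ' + x[i]
--                 i += 1
--
--             spaces = (width - len(line))
--             l_spaces = spaces//2
--             line = '*' + ' '*(l_spaces) + line + ' '*(spaces - l_spaces) + '*'
--             res.append(line)
--
--     res.append('*' * (width + 2))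
--     return res
-- ===== SOURCE B (Python) =====
-- def centerNewsPaperText(paragraphs, width):
--     # pass 1: greedily group each paragraph's words into lines (lists of words)
--     groups = []
--     for words in paragraphs:
--         cur = []
--         cur_len = 0
--         for w in words:
--             if cur and cur_len + len(w) + 1 > width:
--                 groups.append(cur)
--                 cur = [w]
--                 cur_len = len(w)
--             else:
--                 cur_len = len(w) if not cur else cur_len + len(w) + 1
--                 cur = cur + [w]
--         if cur:
--             groups.append(cur)
--     # pass 2: frame each line, centering with spaces//2 on the left
--     border = '*' * (width + 2)
--     out = [border]
--     for g in groups: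
--         raw = ' '.join(g)
--         spaces = width - len(raw)
--         left = spaces // 2
--         out.append('*' + ' ' * left + raw + ' ' * (spaces - left) + '*')
--     out.append(border)
--     return out
-- ===== Notes on version B (the rewrite author's own statement) =====
-- stated objective: simpler
-- what changed: Replaces A's single pass of nested index-driven while loops that build each line by repeated string += with a two-pass decomposition: first greedily group each paragraph's words into lines using a running length, then frame each line with ' '.join and centered padding.
import Mathlib
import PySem

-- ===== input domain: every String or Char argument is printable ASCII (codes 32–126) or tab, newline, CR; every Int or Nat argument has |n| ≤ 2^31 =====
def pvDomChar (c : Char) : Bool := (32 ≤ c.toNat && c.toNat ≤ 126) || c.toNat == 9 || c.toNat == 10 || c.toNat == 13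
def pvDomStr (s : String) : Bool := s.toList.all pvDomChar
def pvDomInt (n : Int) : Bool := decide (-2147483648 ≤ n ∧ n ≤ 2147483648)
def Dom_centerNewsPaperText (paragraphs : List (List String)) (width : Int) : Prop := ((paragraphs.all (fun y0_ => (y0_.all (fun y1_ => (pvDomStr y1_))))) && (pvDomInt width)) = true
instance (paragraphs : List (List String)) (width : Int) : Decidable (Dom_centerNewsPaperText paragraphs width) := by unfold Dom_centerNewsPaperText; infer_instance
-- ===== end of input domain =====

-- B re-decomposes A's single nested-while pass into two passes (group words into lines, then frame
-- them), assembling each line with ' '.join instead of repeated += ; simpler decomposition, same output.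

-- ===== PORT A =====

-- ' ' * n (empty for n ≤ 0, as in Python)
def pvSpaces (n : Int) : List Char := List.replicate n.toNat ' '

-- inner while: line += ' ' + x[i]; i += 1  while it still fits
def pvFillA (line : List Char) (rest : List String) (width : Int) : List Char × List String :=
  match rest with
  | [] => (line, [])
  | w :: ws =>
      if (line.length : Int) + (w.toList.length : Int) + 1 ≤ width then
        pvFillA (line ++ ' ' :: w.toList) ws width
      else (line, w :: ws)

theorem pvFillA_rest_le (line : List Char) (rest : List String) (width : Int) :
    (pvFillA line rest width).2.length ≤ rest.length := by
  induction rest generalizing line with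
  | nil => simp [pvFillA]
  | cons w ws ih =>
      simp only [pvFillA]
      split
      · exact Nat.le_succ_of_le (ih _)
      · simp

-- outer while over one paragraph x: take a word, extend the line while it fits, frame it, continue
def pvParaA (x : List String) (width : Int) : List String :=
  match x with
  | [] => []
  | w :: ws =>
      let p := pvFillA w.toList ws width
      let spaces : Int := width - (p.1.length : Int)
      let l := PySem.Int.floordiv spaces 2
      String.ofList ('*' :: (pvSpaces l ++ p.1 ++ pvSpaces (spaces - l) ++ ['*'])) :: pvParaA p.2 width
termination_by x.length
decreasing_by
  have := pvFillA_rest_le w.toList ws width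
  simp; omega

def centerNewsPaperText (paragraphs : List (List String)) (width : Int) : List String :=
  let border := String.ofList (List.replicate (width + 2).toNat '*')
  (paragraphs.foldl (fun res x => res ++ pvParaA x width) [border]) ++ [border]

-- ===== PORT B =====

-- pass 1 over one paragraph: group words into lines, tracking the joined length
def pvGroupB (words : List String) (cur : List String) (curLen : Int) (width : Int) :
    List (List String) :=
  match words with
  | [] => if cur = [] then [] else [cur]
  | w :: ws =>
      let lw : Int := w.toList.length
      if cur ≠ [] ∧ curLen + lw + 1 > width then
        cur :: pvGroupB ws [w] lw width
      else
        pvGroupB ws (cur ++ [w]) (if cur = [] then lw else curLen + lw + 1) width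

-- pass 2: ' '.join the words of a line and frame it
def pvFrameB (g : List String) (width : Int) : String :=
  let raw := PySem.Chars.join [' '] (g.map String.toList)
  let spaces : Int := width - (raw.length : Int)
  let left := PySem.Int.floordiv spaces 2
  String.ofList ('*' :: (pvSpaces left ++ raw ++ pvSpaces (spaces - left) ++ ['*']))

def centerNewsPaperText_alt (paragraphs : List (List String)) (width : Int) : List String :=
  let groups := paragraphs.foldl (fun acc words => acc ++ pvGroupB words [] 0 width) []
  let border := String.ofList (List.replicate (width + 2).toNat '*')
  (border :: groups.map (fun g => pvFrameB g width)) ++ [border]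

-- ===== PRECONDITION & SPEC =====
def Spec_centerNewsPaperText (paragraphs : List (List String)) (width : Int) (out : List String) : Prop := out = centerNewsPaperText_alt paragraphs width
instance (paragraphs : List (List String)) (width : Int) (out : List String) : Decidable (Spec_centerNewsPaperText paragraphs width out) := by unfold Spec_centerNewsPaperText; infer_instance

-- ===== CLAIM (what is proved, stated in full; the proofs are below) =====
def Claim_equal_centerNewsPaperText : Prop := ∀ (paragraphs : List (List String)) (width : Int), Dom_centerNewsPaperText paragraphs width → Spec_centerNewsPaperText paragraphs width (centerNewsPaperText paragraphs width)

-- ===== LEMMAS AND PROOFS =====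

-- A's framing of a finished raw line (the common shape of both ports' framing step)
def pvFrameRaw (raw : List Char) (width : Int) : String :=
  let spaces : Int := width - (raw.length : Int)
  let l := PySem.Int.floordiv spaces 2
  String.ofList ('*' :: (pvSpaces l ++ raw ++ pvSpaces (spaces - l) ++ ['*']))

theorem pvFrameB_eq (g : List String) (width : Int) :
    pvFrameB g width = pvFrameRaw (PySem.Chars.join [' '] (g.map String.toList)) width := rfl

theorem pvParaA_cons (w : String) (ws : List String) (width : Int) :
    pvParaA (w :: ws) width
      = pvFrameRaw (pvFillA w.toList ws width).1 width
        :: pvParaA (pvFillA w.toList ws width).2 width := by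
  rw [pvParaA]; rfl

theorem pvJoin_snoc (cur : List String) (w : String) (h : cur ≠ []) :
    PySem.Chars.join [' '] ((cur ++ [w]).map String.toList)
      = PySem.Chars.join [' '] (cur.map String.toList) ++ ' ' :: w.toList := by
  induction cur with
  | nil => simp at h
  | cons a as ih =>
      cases as with
      | nil => simp [PySem.Chars.join_cons_cons, PySem.Chars.join_singleton]
      | cons b bs =>
          have h2 : (b :: bs : List String) ≠ [] := by simp
          simp only [List.cons_append, List.map_cons, PySem.Chars.join_cons_cons] at ih ⊢
          rw [show (b.toList :: List.map String.toList (bs ++ [w])) = List.map String.toList (b :: (bs ++ [w])) from rfl] at ih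
          rw [show (b.toList :: List.map String.toList (bs ++ [w])) = List.map String.toList (b :: (bs ++ [w])) from rfl, ih h2]
          simp

theorem group_fill (width : Int) (ws : List String) : ∀ (cur : List String), cur ≠ [] →
    (pvGroupB ws cur ((PySem.Chars.join [' '] (cur.map String.toList)).length : Int) width).map
        (fun g => pvFrameB g width)
      = pvFrameRaw (pvFillA (PySem.Chars.join [' '] (cur.map String.toList)) ws width).1 width
        :: pvParaA (pvFillA (PySem.Chars.join [' '] (cur.map String.toList)) ws width).2 width := by
  induction ws with
  | nil =>
      intro cur hcur
      simp [pvGroupB, pvFillA, hcur, pvParaA, pvFrameB_eq]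
  | cons w ws ih =>
      intro cur hcur
      by_cases hfit :
          ((PySem.Chars.join [' '] (cur.map String.toList)).length : Int)
            + (w.toList.length : Int) + 1 ≤ width
      · -- the word fits: both sides extend the current line
        have hsnoc := pvJoin_snoc cur w hcur
        have hlen :
            ((PySem.Chars.join [' '] ((cur ++ [w]).map String.toList)).length : Int)
              = ((PySem.Chars.join [' '] (cur.map String.toList)).length : Int)
                + (w.toList.length : Int) + 1 := by
          rw [hsnoc]; simp; ring
        have := ih (cur ++ [w]) (by simp)
        rw [hlen, hsnoc] at this
        rw [pvGroupB, pvFillA]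
        simp only [hfit, if_pos, hcur]
        rw [if_neg (by omega)]
        exact this
      · -- the word does not fit: flush the current line, start a new one with w
        have h1 := ih [w] (by simp)
        simp only [List.map_cons, List.map_nil, PySem.Chars.join_singleton] at h1
        rw [pvGroupB, pvFillA]
        rw [if_pos ⟨hcur, by omega⟩, if_neg (by omega)]
        rw [List.map_cons, h1, pvParaA_cons, pvFrameB_eq]

theorem para_eq (x : List String) (width : Int) :
    pvParaA x width = (pvGroupB x [] 0 width).map (fun g => pvFrameB g width) := by
  cases x with
  | nil => simp [pvParaA, pvGroupB]
  | cons w ws =>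
      have := group_fill width ws [w] (by simp)
      simp only [List.map_cons, List.map_nil, PySem.Chars.join_singleton] at this
      rw [pvParaA_cons, pvGroupB, if_neg (by simp)]
      simp only [List.nil_append, if_pos]
      exact this.symm

-- ===== VERDICT (by name: the statement is the Claim_ definition above) =====
theorem centerNewsPaperText_spec : Claim_equal_centerNewsPaperText := by
  intro paragraphs width _
  unfold Spec_centerNewsPaperText
  simp only [centerNewsPaperText, centerNewsPaperText_alt]
  rw [PySem.List.foldl_append_eq_flatMap, PySem.List.foldl_append_eq_flatMap]
  simp [List.map_flatMap, para_eq]
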